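-- pv_equiv track=rewrite | github.com/Daniel14gonc/Labs_lenguajes | Formatter.py | space_operators
-- ===== SOURCE A (Python) =====
-- def space_operators(line):
--     operators = '*+|?()'
--     single = 0
--     result = ""
--     double = 0
--     for element in line:
--         if element == "'" and double % 2 == 0:
--             single += 1
--
--         if element == '"' and single % 2 == 0:
--             double += 1
--         if element in operators:
--             if single % 2 == 0 and double % 2 == 0:
--                 result += ' ' + element + ' '
--             else:
--                 result += element
--         else:
--             result += element
--
--     return result
-- ===== SOURCE B (Python) =====
-- def space_operators(line):
--     # Pass 1: partition into (text, is_inside_quotes) segments with one active quote char.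
--     segments = []
--     buf = []
--     active = None
--     for ch in line:
--         if active is None:
--             if ch == "'" or ch == '"':
--                 if buf:
--                     segments.append((''.join(buf), False))
--                 buf = [ch]
--                 active = ch
--             else:
--                 buf.append(ch)
--         else:
--             buf.append(ch)
--             if ch == active:
--                 segments.append((''.join(buf), True))
--                 buf = []
--                 active = None
--     if buf:
--         segments.append((''.join(buf), active is not None))
--     # Pass 2: space out operators in outside segments only.
--     out = []
--     for text, inside in segments:
--         if inside:
--             out.append(text)
--         else:
--             out.append(''.join(' ' + c + ' ' if c in '*+|?()' else c for c in text))
--     return ''.join(out)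
-- ===== Notes on version B (the rewrite author's own statement) =====
-- stated objective: alternative
-- what changed: B replaces A's fused single loop with parity counters by a two-phase decomposition: one pass partitions the line into (text, is_inside_quotes) segments tracking a single active quote char, a second pass spaces out operators in the unquoted segments only and joins.
import Mathlib
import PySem

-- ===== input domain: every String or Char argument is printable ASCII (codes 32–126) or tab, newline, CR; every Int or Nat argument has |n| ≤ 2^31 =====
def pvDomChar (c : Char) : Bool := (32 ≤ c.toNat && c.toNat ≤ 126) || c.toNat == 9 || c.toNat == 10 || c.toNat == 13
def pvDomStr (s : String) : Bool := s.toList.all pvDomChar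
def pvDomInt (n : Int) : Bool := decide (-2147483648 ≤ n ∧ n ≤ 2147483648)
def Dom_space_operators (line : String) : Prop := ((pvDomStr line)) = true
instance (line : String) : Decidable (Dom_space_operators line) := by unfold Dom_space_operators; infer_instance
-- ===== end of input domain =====

-- B partitions the line into quoted/unquoted segments first and spaces operators in a
-- separate pass over the unquoted segments (objective: alternative decomposition, same cost).
-- Strings are handled on the List Char side (PySem convention); '% 2' with the positive
-- literal divisor 2 is exactly Python's '%', so Lean's Int.emod is exact here.

-- ===== PORT A =====
-- A's fused loop: state (single, double, result), one step per character.
def spaceOpsALoop : List Char → Int → Int → List Char → List Char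
  | [], _, _, result => result
  | element :: rest, single, double, result =>
    let single := if element = '\'' ∧ double % 2 = 0 then single + 1 else single
    let double := if element = '"' ∧ single % 2 = 0 then double + 1 else double
    let result :=
      if element ∈ ['*', '+', '|', '?', '(', ')'] then
        if single % 2 = 0 ∧ double % 2 = 0 then result ++ [' ', element, ' ']
        else result ++ [element]
      else result ++ [element]
    spaceOpsALoop rest single double result

def space_operators (line : String) : String :=
  String.ofList (spaceOpsALoop line.toList 0 0 [])

-- ===== PORT B =====
-- Pass 1: split into (text, is_inside_quotes) segments, tracking one active quote char.
def spaceOpsBPass1 : List Char → List Char → Option Char → List (List Char × Bool)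
  | [], buf, active => if buf = [] then [] else [(buf, active.isSome)]
  | ch :: rest, buf, none =>
    if ch = '\'' ∨ ch = '"' then
      (if buf = [] then [] else [(buf, false)]) ++ spaceOpsBPass1 rest [ch] (some ch)
    else spaceOpsBPass1 rest (buf ++ [ch]) none
  | ch :: rest, buf, some q =>
    if ch = q then (buf ++ [ch], true) :: spaceOpsBPass1 rest [] none
    else spaceOpsBPass1 rest (buf ++ [ch]) (some q)

-- Pass 2 helper: space out operators in one unquoted segment.
def spaceOpsBOut (t : List Char) : List Char :=
  t.flatMap fun c => if c ∈ ['*', '+', '|', '?', '(', ')'] then [' ', c, ' '] else [c]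

def space_operators_alt (line : String) : String :=
  String.ofList
    (((spaceOpsBPass1 line.toList [] none).map
        fun seg => if seg.2 then seg.1 else spaceOpsBOut seg.1).flatten)

-- ===== PRECONDITION & SPEC =====
def Spec_space_operators (line : String) (out : String) : Prop := out = space_operators_alt line
instance (line : String) (out : String) : Decidable (Spec_space_operators line out) := by unfold Spec_space_operators; infer_instance

-- ===== CLAIM (what is proved, stated in full; the proofs are below) =====
def Claim_equal_space_operators : Prop := ∀ (line : String), Dom_space_operators line → Spec_space_operators line (space_operators line)

-- ===== LEMMAS AND PROOFS =====

-- Rendering of a segment list (the body of B's second pass).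
def segRender (segs : List (List Char × Bool)) : List Char :=
  (segs.map fun seg => if seg.2 then seg.1 else spaceOpsBOut seg.1).flatten

-- How the pending buffer will be rendered, given the current quote state.
def bufRender (active : Option Char) (buf : List Char) : List Char :=
  if active.isSome then buf else spaceOpsBOut buf

theorem spaceOpsBOut_append (xs ys : List Char) :
    spaceOpsBOut (xs ++ ys) = spaceOpsBOut xs ++ spaceOpsBOut ys := by
  simp [spaceOpsBOut]

theorem bufRender_append (active : Option Char) (xs ys : List Char) :
    bufRender active (xs ++ ys) = bufRender active xs ++ bufRender active ys := by
  cases active <;> simp [bufRender, spaceOpsBOut_append]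

-- Flush-out lemma: the pending buffer contributes a prefix, rendered in the current mode.
theorem segRender_pass1 (cs : List Char) (buf : List Char) (active : Option Char) :
    segRender (spaceOpsBPass1 cs buf active)
      = bufRender active buf ++ segRender (spaceOpsBPass1 cs [] active) := by
  induction cs generalizing buf active with
  | nil =>
    cases active <;> by_cases hb : buf = [] <;>
      simp [spaceOpsBPass1, segRender, bufRender, hb, spaceOpsBOut]
  | cons ch rest ih =>
    cases active with
    | none =>
      by_cases hq : ch = '\'' ∨ ch = '"'
      · by_cases hb : buf = [] <;>
          simp [spaceOpsBPass1, hq, hb, segRender, bufRender, spaceOpsBOut]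
      · simp only [spaceOpsBPass1, if_neg hq, List.nil_append]
        rw [ih (buf ++ [ch]) none, ih [ch] none, bufRender_append]
        simp [List.append_assoc]
    | some q =>
      by_cases hc : ch = q
      · simp only [spaceOpsBPass1, if_pos hc, List.nil_append]
        simp [segRender, bufRender, List.append_assoc]
      · simp only [spaceOpsBPass1, if_neg hc, List.nil_append]
        rw [ih (buf ++ [ch]) (some q), ih [ch] (some q), bufRender_append]
        simp [List.append_assoc]

-- A's quote-parity state corresponds to B's single active-quote state.
def QInv (single double : Int) (active : Option Char) : Prop :=
  (active = none ∧ single % 2 = 0 ∧ double % 2 = 0) ∨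
  (active = some '\'' ∧ single % 2 = 1 ∧ double % 2 = 0) ∨
  (active = some '"' ∧ single % 2 = 0 ∧ double % 2 = 1)

theorem main_inv (cs : List Char) (single double : Int) (res : List Char)
    (active : Option Char) (h : QInv single double active) :
    spaceOpsALoop cs single double res = res ++ segRender (spaceOpsBPass1 cs [] active) := by
  induction cs generalizing single double res active with
  | nil =>
    simp [spaceOpsALoop, spaceOpsBPass1, segRender]
  | cons c rest ih =>
    rcases h with ⟨ha, hs, hd⟩ | ⟨ha, hs, hd⟩ | ⟨ha, hs, hd⟩ <;> subst ha
    · -- outside quotes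
      by_cases h1 : c = '\''
      · subst h1
        rw [show spaceOpsALoop ('\'' :: rest) single double res
              = spaceOpsALoop rest (single + 1) double (res ++ ['\'']) by
            simp [spaceOpsALoop, hd]]
        rw [ih (single + 1) double _ (some '\'') (by right; left; exact ⟨rfl, by omega, hd⟩)]
        simp [spaceOpsBPass1, segRender_pass1 rest ['\''] (some '\''), bufRender]
      · by_cases h2 : c = '"'
        · subst h2
          rw [show spaceOpsALoop ('"' :: rest) single double res
                = spaceOpsALoop rest single (double + 1) (res ++ ['"']) by
              simp [spaceOpsALoop, hs]]
          rw [ih single (double + 1) _ (some '"') (by right; right; exact ⟨rfl, hs, by omega⟩)]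
          simp [spaceOpsBPass1, segRender_pass1 rest ['"'] (some '"'), bufRender]
        · by_cases hop : c ∈ ['*', '+', '|', '?', '(', ')']
          · rw [show spaceOpsALoop (c :: rest) single double res
                  = spaceOpsALoop rest single double (res ++ [' ', c, ' ']) by
                simp [spaceOpsALoop, h1, h2, hop, hs, hd]]
            rw [ih single double _ none (Or.inl ⟨rfl, hs, hd⟩)]
            rw [show spaceOpsBPass1 (c :: rest) [] none
                  = spaceOpsBPass1 rest [c] none by
                simp [spaceOpsBPass1, h1, h2]]
            rw [segRender_pass1 rest [c] none]
            simp only [List.mem_cons, List.not_mem_nil, or_false] at hop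
            simp [bufRender, spaceOpsBOut, hop]
          · rw [show spaceOpsALoop (c :: rest) single double res
                  = spaceOpsALoop rest single double (res ++ [c]) by
                simp [spaceOpsALoop, h1, h2, hop]]
            rw [ih single double _ none (Or.inl ⟨rfl, hs, hd⟩)]
            rw [show spaceOpsBPass1 (c :: rest) [] none
                  = spaceOpsBPass1 rest [c] none by
                simp [spaceOpsBPass1, h1, h2]]
            rw [segRender_pass1 rest [c] none]
            simp only [List.mem_cons, List.not_mem_nil, or_false] at hop
            simp [bufRender, spaceOpsBOut, hop]
    · -- inside single quotes
      by_cases h1 : c = '\''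
      · subst h1
        rw [show spaceOpsALoop ('\'' :: rest) single double res
              = spaceOpsALoop rest (single + 1) double (res ++ ['\'']) by
            simp [spaceOpsALoop, hd]]
        rw [ih (single + 1) double _ none (Or.inl ⟨rfl, by omega, hd⟩)]
        simp [spaceOpsBPass1, segRender]
      · rw [show spaceOpsALoop (c :: rest) single double res
              = spaceOpsALoop rest single double (res ++ [c]) by
            simp [spaceOpsALoop, h1, hs]]
        rw [ih single double _ (some '\'') (by right; left; exact ⟨rfl, hs, hd⟩)]
        rw [show spaceOpsBPass1 (c :: rest) [] (some '\'')
              = spaceOpsBPass1 rest [c] (some '\'') by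
            simp [spaceOpsBPass1, h1]]
        rw [segRender_pass1 rest [c] (some '\'')]
        simp [bufRender]
    · -- inside double quotes
      by_cases h2 : c = '"'
      · subst h2
        rw [show spaceOpsALoop ('"' :: rest) single double res
              = spaceOpsALoop rest single (double + 1) (res ++ ['"']) by
            simp [spaceOpsALoop, hs, hd]]
        rw [ih single (double + 1) _ none (Or.inl ⟨rfl, hs, by omega⟩)]
        simp [spaceOpsBPass1, segRender]
      · rw [show spaceOpsALoop (c :: rest) single double res
              = spaceOpsALoop rest single double (res ++ [c]) by
            simp [spaceOpsALoop, h2, hd]]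
        rw [ih single double _ (some '"') (by right; right; exact ⟨rfl, hs, hd⟩)]
        rw [show spaceOpsBPass1 (c :: rest) [] (some '"')
              = spaceOpsBPass1 rest [c] (some '"') by
            simp [spaceOpsBPass1, h2]]
        rw [segRender_pass1 rest [c] (some '"')]
        simp [bufRender]

-- ===== VERDICT (by name: the statement is the Claim_ definition above) =====
theorem space_operators_spec : Claim_equal_space_operators := by
  intro line _
  unfold Spec_space_operators space_operators space_operators_alt
  rw [main_inv line.toList 0 0 [] none (Or.inl ⟨rfl, rfl, rfl⟩)]
  simp [segRender]
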